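-- pv_equiv track=rewrite | github.com/godfredO/dsa | staircase_traversal.py | staircaseTraversalIII
-- ===== SOURCE A (Python) =====
-- def staircaseTraversalIII(height, maxSteps):
--     waysToTop = [0 for _ in range(height + 1)]
--     waysToTop[0] = 1
--     waysToTop[1] = 1
--
--     for currentHeight in range(2, height + 1):
--         step = 1  #this is our iterator to keep calculating number of ways and updating waysToTop
--         while step <= maxSteps and step <= currentHeight: #go up to height - maxstep without going negative
--             waysToTop[currentHeight] = waysToTop[currentHeight] + waysToTop[currentHeight - step]
--             step += 1
--
--     return waysToTop[height]
-- ===== SOURCE B (Python) =====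
-- def staircaseTraversalIII(height, maxSteps):
--     # Sliding-window running sum of the last maxSteps DP values: O(height) instead of O(height*maxSteps).
--     ways = [1, 1]          # ways to reach height 0 and height 1
--     window = 1             # sum of the window of values feeding the next height
--     for i in range(2, height + 1):
--         window += ways[i - 1]
--         if i - maxSteps - 1 >= 0:
--             window -= ways[i - maxSteps - 1]
--         ways.append(window)
--     return ways[height]
-- ===== Notes on version B (the rewrite author's own statement) =====
-- stated objective: faster
-- what changed: Replaced the inner while-loop that re-sums up to maxSteps previous DP entries at every height by a single sliding-window running sum maintained across the outer loop, so each height costs O(1).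
-- outside the precondition, e.g. on staircaseTraversalIII(2, 0): A returns 0, B returns 1; on staircaseTraversalIII(0, 3): A raises IndexError, B returns 1; on staircaseTraversalIII(2, -1): A returns 0, B raises IndexError
import Mathlib
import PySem

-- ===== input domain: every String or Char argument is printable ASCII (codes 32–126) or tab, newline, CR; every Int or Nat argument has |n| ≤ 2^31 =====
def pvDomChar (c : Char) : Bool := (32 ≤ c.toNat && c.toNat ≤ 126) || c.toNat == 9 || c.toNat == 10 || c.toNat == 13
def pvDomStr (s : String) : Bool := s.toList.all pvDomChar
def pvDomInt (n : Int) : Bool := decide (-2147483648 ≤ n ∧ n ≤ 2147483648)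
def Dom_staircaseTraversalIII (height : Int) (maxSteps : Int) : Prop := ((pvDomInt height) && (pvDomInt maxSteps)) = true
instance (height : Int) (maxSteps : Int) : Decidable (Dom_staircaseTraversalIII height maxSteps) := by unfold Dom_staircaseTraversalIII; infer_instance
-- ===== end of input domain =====

-- B replaces A's inner re-summing while-loop by a sliding-window running sum: O(height) instead of O(height*maxSteps).

-- ===== PORT A =====
-- the inner 'while step <= maxSteps and step <= currentHeight' loop of A
def pvAWhile (cur maxSteps : Int) (w : List Int) (step : Int) : List Int :=
  if h : step ≤ maxSteps ∧ step ≤ cur then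
    pvAWhile cur maxSteps
      (PySem.List.pySetD w cur
        (PySem.List.pyGetD w cur 0 + PySem.List.pyGetD w (cur - step) 0))
      (step + 1)
  else w
termination_by (maxSteps - step + 1).toNat
decreasing_by omega

def staircaseTraversalIII (height : Int) (maxSteps : Int) : Int :=
  let ways := (PySem.List.pyRange 0 (height + 1) 1).map (fun _ => (0 : Int))
  let ways := PySem.List.pySetD ways 0 1
  let ways := PySem.List.pySetD ways 1 1
  let ways := (PySem.List.pyRange 2 (height + 1) 1).foldl
    (fun w cur => pvAWhile cur maxSteps w 1) ways
  PySem.List.pyGetD ways height 0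

-- ===== PORT B =====
-- one iteration of Source B's for-loop: state = (ways, window)
def pvBStep (maxSteps : Int) (st : List Int × Int) (i : Int) : List Int × Int :=
  let w := st.2 + PySem.List.pyGetD st.1 (i - 1) 0
  let w := if i - maxSteps - 1 ≥ 0 then w - PySem.List.pyGetD st.1 (i - maxSteps - 1) 0 else w
  (st.1 ++ [w], w)

def staircaseTraversalIII_alt (height : Int) (maxSteps : Int) : Int :=
  let st := (PySem.List.pyRange 2 (height + 1) 1).foldl (pvBStep maxSteps) ([1, 1], 1)
  PySem.List.pyGetD st.1 height 0

-- ===== PRECONDITION & SPEC =====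
-- Pre_ excludes height ≤ 0, where A raises IndexError, and maxSteps ≤ 0, a nonpositive
-- step bound outside the natural domain of the problem (there A returns its hard-coded
-- base value while B's window starts differently).
def Pre_staircaseTraversalIII (height : Int) (maxSteps : Int) : Prop :=
  1 ≤ height ∧ 1 ≤ maxSteps
instance (height : Int) (maxSteps : Int) : Decidable (Pre_staircaseTraversalIII height maxSteps) := by
  unfold Pre_staircaseTraversalIII; infer_instance

def pvWitness_staircaseTraversalIII : Int × Int := (5, 2)

def Spec_staircaseTraversalIII (height : Int) (maxSteps : Int) (out : Int) : Prop := out = staircaseTraversalIII_alt height maxSteps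
instance (height : Int) (maxSteps : Int) (out : Int) : Decidable (Spec_staircaseTraversalIII height maxSteps out) := by unfold Spec_staircaseTraversalIII; infer_instance

-- ===== CLAIM (what is proved, stated in full; the proofs are below) =====
def Claim_equal_staircaseTraversalIII : Prop := ∀ (height : Int) (maxSteps : Int), Dom_staircaseTraversalIII height maxSteps → Pre_staircaseTraversalIII height maxSteps → Spec_staircaseTraversalIII height maxSteps (staircaseTraversalIII height maxSteps)

-- ===== LEMMAS AND PROOFS =====

-- the common reference table: pvW m k = [ways 0, ways 1, …, ways (k+1)]
def pvW (m : Int) : Nat → List Int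
  | 0 => [1, 1]
  | k + 1 =>
      let l := pvW m k
      l ++ [(l.drop (l.length - m.toNat)).sum]

-- the last entry of the table
def pvTop (m : Int) : Nat → Int
  | 0 => 1
  | k + 1 => ((pvW m k).drop ((pvW m k).length - m.toNat)).sum

lemma pvW_length (m : Int) (k : Nat) : (pvW m k).length = k + 2 := by
  induction k with
  | zero => rfl
  | succ k ih => simp [pvW, ih]

lemma pvW_succ (m : Int) (k : Nat) :
    pvW m (k + 1) = pvW m k ++ [pvTop m (k + 1)] := rfl

lemma pvW_eq_append_top (m : Int) (k : Nat) :
    pvW m k = (pvW m k).dropLast ++ [pvTop m k] := by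
  cases k with
  | zero => rfl
  | succ k => rw [pvW_succ, List.dropLast_concat]

lemma pvTop_eq_dropLast_sum (m : Int) (hm : 1 ≤ m) (k : Nat) :
    pvTop m k = ((pvW m k).dropLast.drop ((k + 1) - m.toNat)).sum := by
  cases k with
  | zero =>
      have h : 1 - m.toNat = 0 := by omega
      simp [pvTop, pvW, h]
  | succ k =>
      rw [pvW_succ, List.dropLast_concat]
      simp [pvTop, pvW_length]

lemma pvGetD_append_left (l l' : List Int) (i : Int) (h0 : 0 ≤ i) (h : i < (l.length : Int)) :
    PySem.List.pyGetD (l ++ l') i 0 = PySem.List.pyGetD l i 0 := by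
  rw [PySem.List.pyGetD_eq_getElem (l ++ l') 0 h0 (by simp; omega),
      PySem.List.pyGetD_eq_getElem l 0 h0 h]
  exact List.getElem_append_left (by omega)

-- the sliding-window identity: appending one entry shifts the window by one
lemma pvB_window (m : Int) (hm : 1 ≤ m) (n : Nat) :
    pvTop m (n + 1)
      = pvTop m n + pvTop m n
        - (if (2 + (n : Int)) - m - 1 ≥ 0
            then PySem.List.pyGetD (pvW m n) ((2 + (n : Int)) - m - 1) 0 else 0) := by
  have hsplit := pvW_eq_append_top m n
  have htl : (pvW m n).dropLast.length = n + 1 := by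
    simp [List.length_dropLast, pvW_length]
  have htop : pvTop m n = ((pvW m n).dropLast.drop ((n + 1) - m.toNat)).sum :=
    pvTop_eq_dropLast_sum m hm n
  have hnew : pvTop m (n + 1) = ((pvW m n).drop ((n + 2) - m.toNat)).sum := by
    simp [pvTop, pvW_length]
  by_cases hc : (2 + (n : Int)) - m - 1 ≥ 0
  · have hmt : m.toNat ≤ n + 1 := by omega
    have hdlt : (n + 1) - m.toNat < (pvW m n).dropLast.length := by omega
    have hgd : PySem.List.pyGetD (pvW m n) (2 + (n : Int) - m - 1) 0
        = (pvW m n).dropLast[(n + 1) - m.toNat] := by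
      have hcast : (2 + (n : Int) - m - 1) = (((n + 1) - m.toNat : Nat) : Int) := by omega
      rw [hcast, PySem.List.pyGetD_natCast]
      conv_lhs => rw [hsplit]
      rw [List.getD_eq_getElem?_getD, List.getElem?_append_left hdlt,
          List.getElem?_eq_getElem hdlt]
      rfl
    have hdrop2 : (pvW m n).drop ((n + 2) - m.toNat)
        = (pvW m n).dropLast.drop (((n + 1) - m.toNat) + 1) ++ [pvTop m n] := by
      conv_lhs => rw [hsplit]
      rw [List.drop_append_of_le_length (by omega)]
      have h : (n + 2) - m.toNat = ((n + 1) - m.toNat) + 1 := by omega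
      rw [h]
    have hx : pvTop m n
        = (pvW m n).dropLast[(n + 1) - m.toNat]
          + ((pvW m n).dropLast.drop (((n + 1) - m.toNat) + 1)).sum := by
      rw [htop, List.drop_eq_getElem_cons hdlt]; simp
    rw [hnew, hdrop2, if_pos hc, hgd, List.sum_append]
    simp only [List.sum_cons, List.sum_nil, add_zero]
    linarith
  · have hmt : n + 2 ≤ m.toNat := by omega
    rw [hnew, if_neg hc]
    have h1 : (n + 2) - m.toNat = 0 := by omega
    have h2 : (n + 1) - m.toNat = 0 := by omega
    rw [h1, List.drop_zero]
    have hsum : (pvW m n).sum = (pvW m n).dropLast.sum + pvTop m n := by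
      conv_lhs => rw [hsplit]
      simp
    rw [h2, List.drop_zero] at htop
    linarith

-- characterization of A's inner while loop (ascending-index form)
lemma pvAWhile_eq (cur m : Int) (h0 : 0 ≤ cur) :
    ∀ (fuel : Nat) (step : Int), 1 ≤ step → (min m cur + 1 - step).toNat = fuel →
    ∀ w : List Int, cur < (w.length : Int) →
    pvAWhile cur m w step
      = PySem.List.pySetD w cur
          (PySem.List.pyGetD w cur 0
            + ((PySem.List.pyRange (cur - min m cur) (cur - step + 1) 1).map
                (fun j => PySem.List.pyGetD w j 0)).sum) := by
  intro fuel
  induction fuel with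
  | zero =>
      intro step h1 hf w hlen
      have hstop : ¬ (step ≤ m ∧ step ≤ cur) := by omega
      have hnil : PySem.List.pyRange (cur - min m cur) (cur - step + 1) 1 = [] :=
        PySem.List.pyRange_one_eq_nil (by omega)
      rw [pvAWhile, dif_neg hstop, hnil]
      simp only [List.map_nil, List.sum_nil, add_zero]
      rw [PySem.List.pySetD_of_nonneg w _ h0, PySem.List.pyGetD_eq_getElem w 0 h0 hlen]
      have h' : cur.toNat < w.length := by omega
      exact (List.set_getElem_self h').symm
  | succ fuel ih =>
      intro step h1 hf w hlen
      have hcond : step ≤ m ∧ step ≤ cur := by omega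
      have hct : cur.toNat < w.length := by omega
      rw [pvAWhile, dif_pos hcond]
      rw [PySem.List.pySetD_of_nonneg w _ h0]
      set v := PySem.List.pyGetD w cur 0 + PySem.List.pyGetD w (cur - step) 0 with hv
      rw [ih (step + 1) (by omega) (by omega) _ (by simpa using hlen)]
      have hget_cur : PySem.List.pyGetD (w.set cur.toNat v) cur 0 = v := by
        rw [PySem.List.pyGetD_eq_getElem _ 0 h0 (by simpa using hlen)]
        exact List.getElem_set_self (by simpa using hct)
      have hstep' : cur - (step + 1) + 1 = cur - step := by ring
      have hmap : ((PySem.List.pyRange (cur - min m cur) (cur - (step + 1) + 1) 1).map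
                    (fun j => PySem.List.pyGetD (w.set cur.toNat v) j 0))
                = ((PySem.List.pyRange (cur - min m cur) (cur - step) 1).map
                    (fun j => PySem.List.pyGetD w j 0)) := by
        rw [hstep']
        apply List.map_congr_left
        intro j hj
        rw [PySem.List.mem_pyRange_one] at hj
        have hj0 : 0 ≤ j := by omega
        have hjlen : j < (w.length : Int) := by omega
        rw [PySem.List.pyGetD_eq_getElem (i := j) (w.set cur.toNat v) 0 hj0 (by simpa using hjlen),
            PySem.List.pyGetD_eq_getElem (i := j) w 0 hj0 hjlen]
        have hne : cur.toNat ≠ j.toNat := by omega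
        have hjv : j.toNat < (w.set cur.toNat v).length := by simp; omega
        exact List.getElem_set_ne hne hjv
      rw [hget_cur, hmap, PySem.List.pySetD_of_nonneg _ _ h0, List.set_set,
          PySem.List.pySetD_of_nonneg w _ h0]
      rw [PySem.List.pyRange_one_succ_right (by omega : cur - min m cur ≤ cur - step),
          List.map_append, List.sum_append]
      simp only [List.map_cons, List.map_nil, List.sum_cons, List.sum_nil, add_zero]
      congr 1
      rw [hv]; ring

lemma pvA_step (m : Int) (hm : 1 ≤ m) (n z : Nat) :
    pvAWhile (2 + (n : Int)) m (pvW m n ++ (0 : Int) :: List.replicate z 0) 1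
      = pvW m (n + 1) ++ List.replicate z 0 := by
  have hll : (pvW m n).length = n + 2 := pvW_length m n
  have hwl : (pvW m n ++ (0 : Int) :: List.replicate z 0).length = (n + 2) + (z + 1) := by
    simp [hll]
  have hcast : (2 + (n : Int)) = (((n + 2 : Nat)) : Int) := by push_cast; ring
  rw [pvAWhile_eq (2 + (n : Int)) m (by omega) (min m (2 + (n : Int))).toNat 1 (by omega)
      (by omega) _ (by rw [hwl]; push_cast; omega)]
  have hg : PySem.List.pyGetD (pvW m n ++ (0 : Int) :: List.replicate z 0) (2 + (n : Int)) 0 = 0 := by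
    rw [hcast, PySem.List.pyGetD_natCast, List.getD_eq_getElem?_getD,
        List.getElem?_append_right (by omega)]
    have h : n + 2 - (pvW m n).length = 0 := by omega
    rw [h]
    rfl
  have hup : 2 + (n : Int) - 1 + 1 = 2 + (n : Int) := by ring
  have hmap : ((PySem.List.pyRange (2 + (n : Int) - min m (2 + (n : Int))) (2 + (n : Int)) 1).map
        (fun j => PySem.List.pyGetD (pvW m n ++ (0 : Int) :: List.replicate z 0) j 0))
      = ((PySem.List.pyRange (2 + (n : Int) - min m (2 + (n : Int))) (2 + (n : Int)) 1).map
        (fun j => PySem.List.pyGetD (pvW m n) j 0)) := by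
    apply List.map_congr_left
    intro j hj
    rw [PySem.List.mem_pyRange_one] at hj
    exact pvGetD_append_left _ _ j (by omega) (by rw [hll]; push_cast; omega)
  have hlen' : (2 + (n : Int)) = ((pvW m n).length : Int) := by rw [hll]; push_cast; ring
  have hsum : ((PySem.List.pyRange (2 + (n : Int) - min m (2 + (n : Int))) (2 + (n : Int)) 1).map
        (fun j => PySem.List.pyGetD (pvW m n) j 0)).sum
      = ((pvW m n).drop ((pvW m n).length - m.toNat)).sum := by
    conv_lhs => rw [hlen']
    rw [PySem.List.map_pyGetD_pyRange' (pvW m n) 0 (by omega)]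
    have h : (((pvW m n).length : Int) - min m ((pvW m n).length : Int)).toNat
        = (pvW m n).length - m.toNat := by omega
    rw [h]
  rw [hup, hg, hmap, hsum, hcast, PySem.List.pySetD_of_nonneg _ _ (by positivity)]
  simp only [Int.toNat_natCast]
  rw [List.set_append]
  have hnot : ¬ (n + 2 < (pvW m n).length) := by omega
  rw [if_neg hnot]
  have h0 : n + 2 - (pvW m n).length = 0 := by omega
  rw [h0, pvW_succ]
  have htopval : pvTop m (n + 1) = ((pvW m n).drop ((pvW m n).length - m.toNat)).sum := by
    simp [pvTop]
  rw [htopval]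
  simp [List.append_assoc]

lemma pvA_loop (m : Int) (hm : 1 ≤ m) (n : Nat) : ∀ z : Nat,
    (PySem.List.pyRange 2 (2 + (n : Int)) 1).foldl
        (fun w cur => pvAWhile cur m w 1) (pvW m 0 ++ List.replicate (n + z) 0)
      = pvW m n ++ List.replicate z 0 := by
  induction n with
  | zero =>
      intro z
      rw [PySem.List.pyRange_one_eq_nil (by omega)]
      simp
  | succ n ih =>
      intro z
      have hcast : (2 : Int) + ((n + 1 : Nat) : Int) = (2 + (n : Int)) + 1 := by push_cast; ring
      rw [hcast, PySem.List.pyRange_one_succ_right (by omega), List.foldl_append]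
      have hz : n + 1 + z = n + (z + 1) := by omega
      rw [hz, ih (z + 1)]
      simp only [List.foldl_cons, List.foldl_nil]
      rw [List.replicate_succ]
      exact pvA_step m hm n z

lemma pvB_step_eq (m : Int) (hm : 1 ≤ m) (n : Nat) :
    pvBStep m (pvW m n, pvTop m n) (2 + (n : Int)) = (pvW m (n + 1), pvTop m (n + 1)) := by
  have hg1 : PySem.List.pyGetD (pvW m n) (2 + (n : Int) - 1) 0 = pvTop m n := by
    have hcast : 2 + (n : Int) - 1 = ((n + 1 : Nat) : Int) := by push_cast; ring
    have hl : (pvW m n).dropLast.length = n + 1 := by simp [pvW_length]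
    rw [hcast, PySem.List.pyGetD_natCast]
    conv_lhs => rw [pvW_eq_append_top m n, show n + 1 = (pvW m n).dropLast.length from hl.symm]
    simp [List.getD_eq_getElem?_getD]
  have hwin := pvB_window m hm n
  unfold pvBStep
  simp only [hg1]
  by_cases hc : (2 + (n : Int)) - m - 1 ≥ 0
  · rw [if_pos hc] at hwin ⊢
    rw [pvW_succ, hwin]
  · have hwin' : pvTop m (n + 1) = pvTop m n + pvTop m n := by rw [hwin, if_neg hc]; ring
    rw [if_neg hc, pvW_succ, hwin']

lemma pvB_loop (m : Int) (hm : 1 ≤ m) (n : Nat) :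
    (PySem.List.pyRange 2 (2 + (n : Int)) 1).foldl (pvBStep m) ([1, 1], 1)
      = (pvW m n, pvTop m n) := by
  induction n with
  | zero =>
      rw [PySem.List.pyRange_one_eq_nil (by omega)]
      rfl
  | succ n ih =>
      have hcast : (2 : Int) + ((n + 1 : Nat) : Int) = (2 + (n : Int)) + 1 := by push_cast; ring
      rw [hcast, PySem.List.pyRange_one_succ_right (by omega), List.foldl_append, ih]
      simp only [List.foldl_cons, List.foldl_nil]
      exact pvB_step_eq m hm n

-- ===== VERDICT (by name: the statement is the Claim_ definition above) =====
theorem staircaseTraversalIII_spec : Claim_equal_staircaseTraversalIII := by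
  intro height m hdom hpre
  obtain ⟨hh, hm⟩ := hpre
  unfold Spec_staircaseTraversalIII staircaseTraversalIII staircaseTraversalIII_alt
  set n : Nat := (height - 1).toNat with hn
  have hheight : height = 1 + (n : Int) := by omega
  rw [hheight]
  have h2 : (1 + (n : Int)) + 1 = 2 + (n : Int) := by ring
  rw [h2]
  show PySem.List.pyGetD
      ((PySem.List.pyRange 2 (2 + (n : Int)) 1).foldl (fun w cur => pvAWhile cur m w 1)
        (PySem.List.pySetD (PySem.List.pySetD
          ((PySem.List.pyRange 0 (2 + (n : Int)) 1).map (fun _ => (0 : Int))) 0 1) 1 1))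
      (1 + (n : Int)) 0
    = PySem.List.pyGetD
        ((PySem.List.pyRange 2 (2 + (n : Int)) 1).foldl (pvBStep m) ([1, 1], 1)).1
        (1 + (n : Int)) 0
  have hinit : ((PySem.List.pyRange 0 (2 + (n : Int)) 1).map (fun _ => (0 : Int)))
      = List.replicate (n + 2) 0 := by
    rw [List.map_const', PySem.List.length_pyRange_one]
    congr 1
    omega
  rw [hinit]
  have hsets : PySem.List.pySetD (PySem.List.pySetD (List.replicate (n + 2) (0 : Int)) 0 1) 1 1
      = pvW m 0 ++ List.replicate n 0 := by
    rw [PySem.List.pySetD_of_nonneg _ _ (by norm_num), PySem.List.pySetD_of_nonneg _ _ (by norm_num)]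
    simp [List.replicate_succ, pvW]
  rw [hsets]
  have hA := pvA_loop m hm n 0
  simp only [Nat.add_zero, List.replicate_zero, List.append_nil] at hA
  rw [hA, pvB_loop m hm n]
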